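-- pv_equiv track=rewrite | github.com/ahzz1207/Code-search | ASTutils_v2.py | splitToken
-- ===== SOURCE A (Python) =====
-- def splitToken(token):
-- 	subtokens = []
-- 	start = 0
-- 	l = len(token)
-- 	end = start + 1
-- 	while start < l:
-- 		sb = ""
-- 		sb += token[start].lower()
-- 		end = start + 1
-- 		while end < l and token[end].islower():
-- 			sb += token[end]
-- 			end += 1
-- 		subtokens.append(sb)
-- 		if end < l:
-- 			start = end
-- 		else:
-- 			break
--
-- 	return subtokens
-- ===== SOURCE B (Python) =====
-- def splitToken(token):
--     subtokens = []
--     cur = None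
--     for i, c in enumerate(token):
--         if i == 0 or not c.islower():
--             if cur is not None:
--                 subtokens.append(cur)
--             cur = c.lower()
--         else:
--             cur += c
--     if cur is not None:
--         subtokens.append(cur)
--     return subtokens
-- ===== Notes on version B (the rewrite author's own statement) =====
-- stated objective: simpler
-- what changed: Replaced the nested two-pointer while loops (outer start/inner end with an explicit break) by a single linear pass over enumerate(token) that maintains a current-subtoken accumulator, flushing it at each non-lowercase boundary.
import Mathlib
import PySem

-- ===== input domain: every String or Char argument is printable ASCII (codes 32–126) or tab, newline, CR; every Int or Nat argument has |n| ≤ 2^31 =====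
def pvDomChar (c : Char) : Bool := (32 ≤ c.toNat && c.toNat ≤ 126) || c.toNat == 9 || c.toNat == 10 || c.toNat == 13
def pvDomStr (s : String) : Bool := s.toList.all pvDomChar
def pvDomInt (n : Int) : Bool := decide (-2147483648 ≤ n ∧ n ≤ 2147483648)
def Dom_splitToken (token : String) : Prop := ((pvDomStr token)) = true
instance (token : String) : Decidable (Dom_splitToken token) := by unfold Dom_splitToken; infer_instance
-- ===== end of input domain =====

-- B replaces A's nested two-pointer while loops by one linear pass with an accumulator (objective: simpler; return value only, no mutation involved).

-- ===== PORT A =====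
-- inner loop: while end < l and token[end].islower(): sb += token[end]; end += 1
-- (token[end] is always in range here since end < l = len(token), so getD is exact)
def pvInnerA (cs : List Char) (l e : Nat) (sb : List Char) : List Char × Nat :=
  if _h : e < l ∧ PySem.Chars.islower (cs.getD e ' ') = true then
    pvInnerA cs l (e + 1) (sb ++ [cs.getD e ' '])
  else (sb, e)
termination_by l - e
decreasing_by omega

-- needed for the outer loop's termination: the inner loop never moves `end` backwards
theorem pvInnerA_ge (cs : List Char) (l e : Nat) (sb : List Char) :
    e ≤ (pvInnerA cs l e sb).2 := by
  fun_induction pvInnerA cs l e sb with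
  | case1 => omega
  | case2 => simp

-- outer loop: while start < l: … ; if end < l: start = end else break
def pvOuterA (cs : List Char) (l start : Nat) (acc : List String) : List String :=
  if _h : start < l then
    let p := pvInnerA cs l (start + 1) [PySem.Chars.lowerChar (cs.getD start ' ')]
    let acc' := acc ++ [String.ofList p.1]
    if p.2 < l then pvOuterA cs l p.2 acc' else acc'
  else acc
termination_by l - start
decreasing_by
  have := pvInnerA_ge cs l (start + 1) [PySem.Chars.lowerChar (cs.getD start ' ')]
  omega

def splitToken (token : String) : List String :=
  pvOuterA token.toList token.toList.length 0 []

-- ===== PORT B =====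
-- append `cur` to the result if it is not None
def pvFlushB (res : List String) (cur : Option (List Char)) : List String :=
  match cur with
  | none => res
  | some sb => res ++ [String.ofList sb]

-- body of `for i, c in enumerate(token)`
def pvStepB (st : List String × Option (List Char)) (ic : Int × Char) :
    List String × Option (List Char) :=
  if ic.1 == 0 || !(PySem.Chars.islower ic.2) then
    (pvFlushB st.1 st.2, some [PySem.Chars.lowerChar ic.2])
  else (st.1, st.2.map (· ++ [ic.2]))

def splitToken_alt (token : String) : List String :=
  let st := (PySem.List.enumerate token.toList).foldl pvStepB ([], none)
  pvFlushB st.1 st.2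

-- ===== PRECONDITION & SPEC =====
def Spec_splitToken (token : String) (out : List String) : Prop := out = splitToken_alt token
instance (token : String) (out : List String) : Decidable (Spec_splitToken token out) := by unfold Spec_splitToken; infer_instance

-- ===== CLAIM (what is proved, stated in full; the proofs are below) =====
def Claim_equal_splitToken : Prop := ∀ (token : String), Dom_splitToken token → Spec_splitToken token (splitToken token)

-- ===== LEMMAS AND PROOFS =====

-- common characterisation: split at every non-lowercase character, lowercasing the split char
def pvSplitSpec : List Char → List String
  | [] => []
  | c :: rest =>
      String.ofList (PySem.Chars.lowerChar c :: rest.takeWhile PySem.Chars.islower) ::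
        pvSplitSpec (rest.dropWhile PySem.Chars.islower)
termination_by cs => cs.length
decreasing_by
  have := List.length_dropWhile_le PySem.Chars.islower rest
  simp at *; omega

theorem pvInnerA_spec (cs : List Char) (e : Nat) (sb : List Char) :
    pvInnerA cs cs.length e sb =
      (sb ++ (cs.drop e).takeWhile PySem.Chars.islower,
       e + ((cs.drop e).takeWhile PySem.Chars.islower).length) := by
  fun_induction pvInnerA cs cs.length e sb with
  | case1 e sb h ih =>
      obtain ⟨he, hl⟩ := h
      have hd : cs.drop e = cs[e] :: cs.drop (e + 1) := List.drop_eq_getElem_cons he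
      have hg : cs.getD e ' ' = cs[e] := List.getD_eq_getElem cs ' ' he
      rw [ih, hd]
      rw [hg] at hl
      rw [List.takeWhile_cons, if_pos hl, hg]
      simp
      omega
  | case2 e sb h =>
      rcases Nat.lt_or_ge e cs.length with he | he
      · have hg : cs.getD e ' ' = cs[e] := List.getD_eq_getElem cs ' ' he
        have hl : PySem.Chars.islower cs[e] = false := by
          rw [← hg]; by_contra hc
          exact h ⟨he, by simpa using hc⟩
        have hd : cs.drop e = cs[e] :: cs.drop (e + 1) := List.drop_eq_getElem_cons he
        rw [hd]
        simp [hl]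
      · have : cs.drop e = [] := List.drop_eq_nil_of_le he
        simp [this]

theorem pvOuterA_spec (cs : List Char) (start : Nat) (acc : List String) :
    pvOuterA cs cs.length start acc = acc ++ pvSplitSpec (cs.drop start) := by
  fun_induction pvOuterA cs cs.length start acc with
  | case1 start acc h p acc' hlt ih =>
      -- recursive case: end < l
      rw [ih]
      have hp := pvInnerA_spec cs (start + 1) [PySem.Chars.lowerChar (cs.getD start ' ')]
      have hdcons : cs.drop start = cs[start] :: cs.drop (start + 1) := List.drop_eq_getElem_cons h
      have hg : cs.getD start ' ' = cs[start] := List.getD_eq_getElem cs ' ' h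
      have hdrop : cs.drop p.2 = (cs.drop (start + 1)).dropWhile PySem.Chars.islower := by
        have h2 : p.2 = (start + 1) + ((cs.drop (start + 1)).takeWhile PySem.Chars.islower).length := by
          rw [show p = pvInnerA cs cs.length (start + 1) [PySem.Chars.lowerChar (cs.getD start ' ')] from rfl, hp]
        rw [h2, ← List.drop_drop]
        have := List.takeWhile_append_dropWhile (p := PySem.Chars.islower) (l := cs.drop (start + 1))
        calc ((cs.drop (start+1)).drop ((cs.drop (start+1)).takeWhile PySem.Chars.islower).length)
            = (((cs.drop (start+1)).takeWhile PySem.Chars.islower ++ (cs.drop (start+1)).dropWhile PySem.Chars.islower).drop ((cs.drop (start+1)).takeWhile PySem.Chars.islower).length) := by rw [this]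
          _ = (cs.drop (start+1)).dropWhile PySem.Chars.islower := List.drop_left
      have hp1 : p.1 = PySem.Chars.lowerChar cs[start] :: (cs.drop (start + 1)).takeWhile PySem.Chars.islower := by
        rw [show p = pvInnerA cs cs.length (start + 1) [PySem.Chars.lowerChar (cs.getD start ' ')] from rfl, hp, hg]
        simp
      rw [hdrop, hdcons, pvSplitSpec]
      simp [acc', hp1]
  | case2 start acc h p acc' hge =>
      -- break case: end ≥ l, so the rest after this subtoken is empty
      have hp := pvInnerA_spec cs (start + 1) [PySem.Chars.lowerChar (cs.getD start ' ')]
      have hdcons : cs.drop start = cs[start] :: cs.drop (start + 1) := List.drop_eq_getElem_cons h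
      have hg : cs.getD start ' ' = cs[start] := List.getD_eq_getElem cs ' ' h
      have hdrop : cs.drop p.2 = (cs.drop (start + 1)).dropWhile PySem.Chars.islower := by
        have h2 : p.2 = (start + 1) + ((cs.drop (start + 1)).takeWhile PySem.Chars.islower).length := by
          rw [show p = pvInnerA cs cs.length (start + 1) [PySem.Chars.lowerChar (cs.getD start ' ')] from rfl, hp]
        rw [h2, ← List.drop_drop]
        have := List.takeWhile_append_dropWhile (p := PySem.Chars.islower) (l := cs.drop (start + 1))
        calc ((cs.drop (start+1)).drop ((cs.drop (start+1)).takeWhile PySem.Chars.islower).length)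
            = (((cs.drop (start+1)).takeWhile PySem.Chars.islower ++ (cs.drop (start+1)).dropWhile PySem.Chars.islower).drop ((cs.drop (start+1)).takeWhile PySem.Chars.islower).length) := by rw [this]
          _ = (cs.drop (start+1)).dropWhile PySem.Chars.islower := List.drop_left
      have hnil : (cs.drop (start + 1)).dropWhile PySem.Chars.islower = [] := by
        rw [← hdrop]; exact List.drop_eq_nil_of_le (by omega)
      have hp1 : p.1 = PySem.Chars.lowerChar cs[start] :: (cs.drop (start + 1)).takeWhile PySem.Chars.islower := by
        rw [show p = pvInnerA cs cs.length (start + 1) [PySem.Chars.lowerChar (cs.getD start ' ')] from rfl, hp, hg]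
        simp
      rw [hdcons, pvSplitSpec, hnil]
      simp [acc', hp1, pvSplitSpec]
  | case3 start acc h =>
      have : cs.drop start = [] := List.drop_eq_nil_of_le (by omega)
      simp [this, pvSplitSpec]

-- the index-free step B takes after the first iteration
def pvStepB' (st : List String × Option (List Char)) (c : Char) :
    List String × Option (List Char) :=
  if !(PySem.Chars.islower c) then
    (pvFlushB st.1 st.2, some [PySem.Chars.lowerChar c])
  else (st.1, st.2.map (· ++ [c]))

theorem foldl_stepB_pos (l : List (Int × Char)) (st : List String × Option (List Char))
    (hl : ∀ p ∈ l, p.1 ≠ 0) :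
    l.foldl pvStepB st = (l.map Prod.snd).foldl pvStepB' st := by
  induction l generalizing st with
  | nil => rfl
  | cons p rest ih =>
      have hp : p.1 ≠ 0 := hl p (by simp)
      have hstep : pvStepB st p = pvStepB' st p.2 := by
        simp [pvStepB, pvStepB', hp]
      simp only [List.foldl_cons, List.map_cons, hstep]
      exact ih _ (fun q hq => hl q (by simp [hq]))

-- running the index-free fold with an open accumulator
def pvSplit2 (sb : List Char) : List Char → List String
  | [] => [String.ofList sb]
  | c :: rest =>
      if PySem.Chars.islower c then pvSplit2 (sb ++ [c]) rest
      else String.ofList sb :: pvSplit2 [PySem.Chars.lowerChar c] rest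

theorem foldl_stepB'_spec (cs : List Char) (res : List String) (sb : List Char) :
    pvFlushB (cs.foldl pvStepB' (res, some sb)).1 (cs.foldl pvStepB' (res, some sb)).2 =
      res ++ pvSplit2 sb cs := by
  induction cs generalizing res sb with
  | nil => simp [pvFlushB, pvSplit2]
  | cons c rest ih =>
      by_cases hc : PySem.Chars.islower c
      · have : pvStepB' (res, some sb) c = (res, some (sb ++ [c])) := by
          simp [pvStepB', hc]
        simp only [List.foldl_cons, this, ih, pvSplit2, hc, if_pos]
      · have : pvStepB' (res, some sb) c = (res ++ [String.ofList sb], some [PySem.Chars.lowerChar c]) := by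
          simp [pvStepB', hc, pvFlushB]
        simp only [List.foldl_cons, this, ih, pvSplit2, hc]
        simp

theorem pvSplit2_eq (cs : List Char) (sb : List Char) :
    pvSplit2 sb cs =
      String.ofList (sb ++ cs.takeWhile PySem.Chars.islower) ::
        pvSplitSpec (cs.dropWhile PySem.Chars.islower) := by
  induction cs generalizing sb with
  | nil => simp [pvSplit2, pvSplitSpec]
  | cons c rest ih =>
      by_cases hc : PySem.Chars.islower c
      · simp [pvSplit2, hc, ih]
      · have hc' : PySem.Chars.islower c = false := by simpa using hc
        simp [pvSplit2, hc', ih, pvSplitSpec]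

theorem splitToken_alt_eq_spec (token : String) :
    splitToken_alt token = pvSplitSpec token.toList := by
  unfold splitToken_alt
  cases hcs : token.toList with
  | nil => simp [PySem.List.enumerate_nil, pvFlushB, pvSplitSpec]
  | cons c rest =>
      rw [PySem.List.enumerate_cons]
      have h0 : pvStepB ([], none) (0, c) = ([], some [PySem.Chars.lowerChar c]) := by
        simp [pvStepB, pvFlushB]
      simp only [List.foldl_cons, h0]
      have hpos : ∀ p ∈ PySem.List.enumerate rest (0 + 1), p.1 ≠ 0 := by
        intro p hp
        rw [PySem.List.mem_enumerate_iff] at hp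
        obtain ⟨k, hk, rfl⟩ := hp
        omega
      rw [foldl_stepB_pos _ _ hpos, PySem.List.map_snd_enumerate,
        foldl_stepB'_spec, pvSplit2_eq, pvSplitSpec]
      simp

theorem splitToken_eq_spec (token : String) :
    splitToken token = pvSplitSpec token.toList := by
  unfold splitToken
  rw [pvOuterA_spec]
  simp

-- ===== VERDICT (by name: the statement is the Claim_ definition above) =====
theorem splitToken_spec : Claim_equal_splitToken := by
  intro token _
  unfold Spec_splitToken
  rw [splitToken_eq_spec, splitToken_alt_eq_spec]
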